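-- pv_equiv track=rewrite | github.com/brunocsrribeiro/projeto-pessoal-trybe-restaurant-orders | src/publicity_campaign.py | get_days_never_visited
-- ===== SOURCE A (Python) =====
-- def get_days_never_visited(orders, client):
--     get_days = set()
--     get_clients = set()
--
--     for name, _, day in orders:
--         get_days.add(day)
--         if name == client:
--             get_clients.add(day)
--     return get_days.difference(get_clients)
-- ===== SOURCE B (Python) =====
-- def get_days_never_visited(orders, client):
--     return {day for _, _, day in orders
--             if not any(n == client and d == day for n, _, d in orders)}
-- ===== Notes on version B (the rewrite author's own statement) =====
-- stated objective: alternative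
-- what changed: B keeps no sets during traversal: it decides each day directly by a brute-force rescan of all orders (any(n == client and d == day)), a quadratic nested-scan algorithm instead of A's single pass that maintains two accumulated day-sets and subtracts them.
import Mathlib
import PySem

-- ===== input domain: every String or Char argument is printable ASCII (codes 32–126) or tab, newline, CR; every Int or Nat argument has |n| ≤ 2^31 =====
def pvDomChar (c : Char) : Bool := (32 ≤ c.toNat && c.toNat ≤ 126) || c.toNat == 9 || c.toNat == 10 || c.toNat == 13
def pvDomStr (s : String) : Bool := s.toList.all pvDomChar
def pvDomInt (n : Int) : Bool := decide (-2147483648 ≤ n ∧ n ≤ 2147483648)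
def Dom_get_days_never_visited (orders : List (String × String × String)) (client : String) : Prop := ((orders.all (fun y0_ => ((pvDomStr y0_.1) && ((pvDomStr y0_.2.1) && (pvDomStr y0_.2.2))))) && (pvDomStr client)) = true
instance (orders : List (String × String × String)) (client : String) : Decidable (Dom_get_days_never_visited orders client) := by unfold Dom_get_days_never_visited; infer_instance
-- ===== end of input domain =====

-- B replaces A's one-pass accumulation of two day-sets and their difference with a
-- brute-force nested scan: each day qualifies iff no rescan of the whole order list
-- finds that client on that day; alternative algorithm, quadratic instead of linear.

-- ===== PORT A =====
def get_days_never_visited (orders : List (String × String × String)) (client : String) : List String :=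
  let st := orders.foldl
    (fun st t =>
      (PySem.Set.add st.1 t.2.2,
       if t.1 == client then PySem.Set.add st.2 t.2.2 else st.2))
    (PySem.Set.empty, PySem.Set.empty)
  PySem.Set.diff st.1 st.2

-- ===== PORT B =====
def get_days_never_visited_alt (orders : List (String × String × String)) (client : String) : List String :=
  orders.foldl
    (fun r t =>
      if !(orders.any (fun u => u.1 == client && u.2.2 == t.2.2)) then PySem.Set.add r t.2.2
      else r)
    PySem.Set.empty

-- ===== PRECONDITION & SPEC =====
def Spec_get_days_never_visited (orders : List (String × String × String)) (client : String) (out : List String) : Prop := out = get_days_never_visited_alt orders client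
instance (orders : List (String × String × String)) (client : String) (out : List String) : Decidable (Spec_get_days_never_visited orders client out) := by unfold Spec_get_days_never_visited; infer_instance

-- ===== CLAIM (what is proved, stated in full; the proofs are below) =====
def Claim_equal_get_days_never_visited : Prop := ∀ (orders : List (String × String × String)) (client : String), Dom_get_days_never_visited orders client → Spec_get_days_never_visited orders client (get_days_never_visited orders client)

-- ===== LEMMAS AND PROOFS =====

/-- A's first accumulator ignores the second: it is just the fold of Set.add over the days. -/
lemma pv_fst (client : String) :
    ∀ (l : List (String × String × String)) (gd gc : PySem.Set String),
    (l.foldl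
      (fun st t =>
        (PySem.Set.add st.1 t.2.2,
         if t.1 == client then PySem.Set.add st.2 t.2.2 else st.2)) (gd, gc)).1
    = l.foldl (fun s t => PySem.Set.add s t.2.2) gd := by
  intro l
  induction l with
  | nil => intro gd gc; rfl
  | cons t rest ih =>
      intro gd gc
      simp only [List.foldl_cons]
      split <;> exact ih _ _

/-- Membership in A's second accumulator: the client ordered on that day. -/
lemma pv_snd (client : String) (x : String) :
    ∀ (l : List (String × String × String)) (gd gc : PySem.Set String),
    (x ∈ (l.foldl
      (fun st t =>
        (PySem.Set.add st.1 t.2.2,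
         if t.1 == client then PySem.Set.add st.2 t.2.2 else st.2)) (gd, gc)).2)
    ↔ (x ∈ gc ∨ ∃ t ∈ l, t.1 = client ∧ t.2.2 = x) := by
  intro l
  induction l with
  | nil => intro gd gc; simp
  | cons t rest ih =>
      intro gd gc
      simp only [List.foldl_cons]
      by_cases h : t.1 = client
      · simp only [h, BEq.rfl, if_true, ih, PySem.Set.mem_add, List.mem_cons]
        constructor
        · rintro (⟨hm | hm⟩ | ⟨u, hu, h1, h2⟩)
          · exact Or.inl hm
          · exact Or.inr ⟨t, Or.inl rfl, h, hm.symm⟩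
          · exact Or.inr ⟨u, Or.inr hu, h1, h2⟩
        · rintro (hm | ⟨u, (rfl | hu), h1, h2⟩)
          · exact Or.inl (Or.inl hm)
          · exact Or.inl (Or.inr h2.symm)
          · exact Or.inr ⟨u, hu, h1, h2⟩
      · have hb : (t.1 == client) = false := by simp [h]
        simp only [hb, Bool.false_eq_true, if_false, ih, List.mem_cons]
        constructor
        · rintro (hm | ⟨u, hu, h1, h2⟩)
          · exact Or.inl hm
          · exact Or.inr ⟨u, Or.inr hu, h1, h2⟩
        · rintro (hm | ⟨u, (rfl | hu), h1, h2⟩)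
          · exact Or.inl hm
          · exact absurd h1 h
          · exact Or.inr ⟨u, hu, h1, h2⟩

/-- Filtering the accumulated day-set by a day-only predicate equals folding the
    filtered additions, provided the accumulators already agree. -/
lemma pv_filter_fold (p : String → Bool) :
    ∀ (l : List (String × String × String)) (gd r : PySem.Set String),
    gd.Nodup → r = gd.filter p →
    (l.foldl (fun s t => PySem.Set.add s t.2.2) gd).filter p
      = l.foldl (fun r t => if p t.2.2 then PySem.Set.add r t.2.2 else r) r := by
  intro l
  induction l with
  | nil => intro gd r _ h; simp [h]
  | cons t rest ih =>
      intro gd r hnd h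
      simp only [List.foldl_cons]
      apply ih
      · exact PySem.Set.nodup_add _ _ hnd
      · subst h
        by_cases hm : t.2.2 ∈ gd
        · rw [PySem.Set.add_of_mem hm]
          by_cases hp : p t.2.2 = true
          · rw [if_pos hp, PySem.Set.add_of_mem (List.mem_filter.2 ⟨hm, hp⟩)]
          · rw [if_neg hp]
        · rw [PySem.Set.add_of_not_mem hm, List.filter_append]
          by_cases hp : p t.2.2 = true
          · rw [if_pos hp, PySem.Set.add_of_not_mem (fun hc => hm (List.mem_filter.1 hc).1)]
            simp [hp]
          · rw [if_neg hp]
            simp [hp]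

/-- Set.diff is a filter by non-membership. -/
lemma pv_diff_filter (s t : PySem.Set String) :
    PySem.Set.diff s t = s.filter (fun x => !(PySem.Set.contains t x)) := by
  rfl

-- ===== VERDICT (by name: the statement is the Claim_ definition above) =====
theorem get_days_never_visited_spec : Claim_equal_get_days_never_visited := by
  intro orders client _
  unfold Spec_get_days_never_visited get_days_never_visited get_days_never_visited_alt
  simp only
  rw [pv_diff_filter, pv_fst client]
  have hpred : ∀ x : String,
      (!(PySem.Set.contains (orders.foldl
        (fun st t =>
          (PySem.Set.add st.1 t.2.2,
           if t.1 == client then PySem.Set.add st.2 t.2.2 else st.2))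
        (PySem.Set.empty, PySem.Set.empty)).2 x))
      = (!(orders.any (fun u => u.1 == client && u.2.2 == x))) := by
    intro x
    congr 1
    rw [Bool.eq_iff_iff, PySem.Set.contains_iff, pv_snd client x, List.any_eq_true]
    constructor
    · rintro (hm | ⟨u, hu, h1, h2⟩)
      · exact absurd hm (List.not_mem_nil)
      · exact ⟨u, hu, by simp [h1, h2]⟩
    · rintro ⟨u, hu, hb⟩
      simp only [Bool.and_eq_true, beq_iff_eq] at hb
      exact Or.inr ⟨u, hu, hb.1, hb.2⟩
  rw [List.filter_congr (fun x _ => hpred x)]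
  exact pv_filter_fold _ orders PySem.Set.empty PySem.Set.empty List.nodup_nil rfl
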